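-- pv_equiv track=rewrite | github.com/IGR2020/DebLang | debLang.py | leadingSpaces
-- ===== SOURCE A (Python) =====
-- def leadingSpaces(line):
--     count = ''
--     for char in line:
--         if char == ' ':
--             count += " "
--         else:
--             break
--     return count
-- ===== SOURCE B (Python) =====
-- def leadingSpaces(line):
--     return line[:len(line) - len(line.lstrip(' '))]
-- ===== Notes on version B (the rewrite author's own statement) =====
-- stated objective: idiomatic
-- what changed: B replaces the char-by-char accumulating loop with a single boundary computation: the length difference against line left-stripped of spaces gives where the leading spaces end, and B returns that slice of line.
import Mathlib
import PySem

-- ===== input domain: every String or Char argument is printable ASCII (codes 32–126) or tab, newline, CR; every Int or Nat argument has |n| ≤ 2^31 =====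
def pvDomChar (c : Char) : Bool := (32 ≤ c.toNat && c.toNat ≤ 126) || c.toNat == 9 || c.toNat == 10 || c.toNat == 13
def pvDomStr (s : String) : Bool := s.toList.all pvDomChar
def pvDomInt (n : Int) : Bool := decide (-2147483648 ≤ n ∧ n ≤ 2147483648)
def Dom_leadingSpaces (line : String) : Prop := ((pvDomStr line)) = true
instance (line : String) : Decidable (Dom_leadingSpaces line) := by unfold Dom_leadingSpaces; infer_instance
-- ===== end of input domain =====

-- B: single boundary computation via left-strip-of-spaces length difference + slice, instead of rebuilding the prefix char by char (idiomatic, same cost).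
-- ===== PORT A =====
-- the for-loop with break, accumulating 'count'
def leadingSpacesGo : List Char → String → String
  | [], count => count
  | c :: rest, count => if c == ' ' then leadingSpacesGo rest (count ++ " ") else count

def leadingSpaces (line : String) : String := leadingSpacesGo line.toList ""

-- ===== PORT B =====
-- line.lstrip(' '): exact hand port — drops exactly the leading ' ' characters (PySem has no single-sided strip-with-chars)
def pyLstripSpace (line : String) : List Char := line.toList.dropWhile (· == ' ')

def leadingSpaces_alt (line : String) : String :=
  PySem.Str.slice line none (some ((line.toList.length : Int) - (pyLstripSpace line).length))

-- ===== PRECONDITION & SPEC =====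
def Spec_leadingSpaces (line : String) (out : String) : Prop := out = leadingSpaces_alt line
instance (line : String) (out : String) : Decidable (Spec_leadingSpaces line out) := by unfold Spec_leadingSpaces; infer_instance

-- ===== CLAIM (what is proved, stated in full; the proofs are below) =====
def Claim_equal_leadingSpaces : Prop := ∀ (line : String), Dom_leadingSpaces line → Spec_leadingSpaces line (leadingSpaces line)

-- ===== LEMMAS AND PROOFS =====
theorem toList_injective {a b : String} (h : a.toList = b.toList) : a = b :=
  String.toList_inj.mp h

theorem goA_eq (cs : List Char) (acc : String) :
    (leadingSpacesGo cs acc).toList = acc.toList ++ cs.takeWhile (· == ' ') := by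
  induction cs generalizing acc with
  | nil => simp [leadingSpacesGo]
  | cons c rest ih =>
    by_cases h : c = ' '
    · simp [leadingSpacesGo, h, ih]
    · simp [leadingSpacesGo, h]

theorem aList (line : String) :
    (leadingSpaces line).toList = line.toList.takeWhile (· == ' ') := by
  simpa using goA_eq line.toList ""

theorem altList (line : String) :
    (leadingSpaces_alt line).toList = line.toList.takeWhile (· == ' ') := by
  unfold leadingSpaces_alt pyLstripSpace
  have hlen : line.toList.length - (line.toList.dropWhile (· == ' ')).length
      = (line.toList.takeWhile (· == ' ')).length := by
    have h1 : (line.toList.takeWhile (· == ' ')).length + (line.toList.dropWhile (· == ' ')).length = line.toList.length := by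
      rw [← List.length_append, List.takeWhile_append_dropWhile]
    omega
  have hb : ((line.toList.length : Int) - (line.toList.dropWhile (· == ' ')).length)
      = ((line.toList.takeWhile (· == ' ')).length : Int) := by
    have h1 : (line.toList.dropWhile (· == ' ')).length ≤ line.toList.length :=
      List.length_dropWhile_le _ _
    omega
  rw [hb]
  have htake : List.take (line.toList.takeWhile (· == ' ')).length line.toList
      = line.toList.takeWhile (· == ' ') := by
    induction line.toList with
    | nil => simp
    | cons c rest ih => by_cases h : c = ' ' <;> simp [h, ih]
  simp [PySem.Str.toList_slice, PySem.List.slice_to_natCast, htake]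


-- ===== VERDICT (by name: the statement is the Claim_ definition above) =====
theorem leadingSpaces_spec : Claim_equal_leadingSpaces := by
  intro line _
  unfold Spec_leadingSpaces
  apply toList_injective
  rw [altList, aList]
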